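-- pv_equiv track=rewrite | github.com/JoJoTsui/rnadnavar | bin/vcf_utils/classification.py | classify_mutect2_variant
-- ===== SOURCE A (Python) =====
-- def classify_mutect2_variant(filter_val, info_dict=None):
--     """
--     Classifies a Mutect2 VCF FILTER string into exactly ONE of 4 categories:
--     Somatic, Germline, Reference, Artifact.
--
--     Priority Hierarchy:
--     1. Somatic   (FILTER == 'PASS', None, or '.' - unfiltered/passing variants)
--     2. Germline  (Contains 'germline' or 'haplotype')
--     3. Reference (Contains 'panel_of_normals', 'contamination', 'possible_numt')
--     4. Artifact  (Everything else - technical filter failures)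
--
--     Note: Mutect2 VCFs can be:
--     - Unfiltered (before FilterMutectCalls): FILTER = '.' or None → Somatic candidates
--     - Filtered (after FilterMutectCalls): FILTER = 'PASS' or specific filter labels
--
--     Args:
--         filter_val (str): The value from the VCF FILTER column.
--                           Can be None (unfiltered variant - treated as Somatic).
--                           Can be semicolon-separated for multiple filters.
--         info_dict (dict): Optional INFO field dictionary (unused, kept for API compatibility).
--
--     Returns:
--         str: One of ['Somatic', 'Germline', 'Reference', 'Artifact']
--     """
--     # 1. Handle None, empty, or '.' as Somatic (unfiltered/passing variants)
--     # cyvcf2 returns None for FILTER when VCF has '.' (unfiltered)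
--     # These are somatic candidates that haven't been filtered out
--     if filter_val is None or filter_val == "" or filter_val == ".":
--         return "Somatic"
--
--     # Convert to string and normalize
--     filter_str = str(filter_val).strip()
--
--     # Handle empty string after stripping
--     if not filter_str or filter_str == ".":
--         return "Somatic"
--
--     # 2. Explicit PASS → Somatic
--     if filter_str == "PASS":
--         return "Somatic"
--
--     # 3. Parse Filters
--     # Split by semicolon to handle multiple filters (e.g., "map_qual;germline")
--     filters = [f.strip().lower() for f in filter_str.split(";") if f.strip()]
--
--     # If no valid filters after parsing, treat as Somatic
--     if not filters:
--         return "Somatic"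
--
--     # 4. Priority Check: Germline
--     # If any filter is germline-related, the biological classification is Germline.
--     germline_triggers = {"germline", "haplotype"}
--     if any(f in germline_triggers for f in filters):
--         return "Germline"
--
--     # 5. Priority Check: Reference
--     # If not germline, check for systematic/external reference issues.
--     reference_triggers = {"panel_of_normals", "contamination", "possible_numt"}
--     if any(f in reference_triggers for f in filters):
--         return "Reference"
--
--     # 6. Default: Artifact
--     # Falls here if:
--     # - It has explicit filter labels (not PASS/None/.)
--     # - It has no Germline tags
--     # - It has no Reference tags
--     # - Contains technical errors (strand_bias, weak_evidence, base_qual, etc.)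
--     return "Artifact"
-- ===== SOURCE B (Python) =====
-- _RANK = {
--     "germline": 1,
--     "haplotype": 1,
--     "panel_of_normals": 2,
--     "contamination": 2,
--     "possible_numt": 2,
-- }
--
-- _LABELS = ("Somatic", "Germline", "Reference", "Artifact")
--
--
-- def classify_mutect2_variant(filter_val, info_dict=None):
--     if filter_val is None:
--         return "Somatic"
--     s = str(filter_val).strip()
--     if s in ("", ".", "PASS"):
--         return "Somatic"
--     best = min((_RANK.get(t.strip().lower(), 3) for t in s.split(";") if t.strip()),
--                default=0)
--     return _LABELS[best]
-- ===== Notes on version B (the rewrite author's own statement) =====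
-- stated objective: simpler
-- what changed: Collapses A's guard chain into one strip + one three-way membership test and replaces its two any()-membership scans and result branches with min() of a constant token->rank table over the tokens (default 0), indexed into a label tuple.
import Mathlib
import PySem

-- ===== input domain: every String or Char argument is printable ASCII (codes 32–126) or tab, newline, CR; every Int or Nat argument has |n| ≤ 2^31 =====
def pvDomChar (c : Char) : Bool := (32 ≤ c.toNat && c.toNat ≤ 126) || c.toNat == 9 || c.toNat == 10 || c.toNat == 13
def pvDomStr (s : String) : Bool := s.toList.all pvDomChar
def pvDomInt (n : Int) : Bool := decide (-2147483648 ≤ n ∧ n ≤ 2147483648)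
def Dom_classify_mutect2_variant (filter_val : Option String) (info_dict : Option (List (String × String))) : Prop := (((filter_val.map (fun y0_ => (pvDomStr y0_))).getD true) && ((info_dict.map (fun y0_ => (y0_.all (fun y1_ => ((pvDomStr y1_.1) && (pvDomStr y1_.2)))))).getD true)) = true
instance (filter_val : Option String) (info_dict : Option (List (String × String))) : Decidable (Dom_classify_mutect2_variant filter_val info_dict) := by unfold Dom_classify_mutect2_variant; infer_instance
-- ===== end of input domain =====

-- B is a simpler table-driven decomposition: one strip + one membership guard, then the
-- minimum priority rank over the tokens (default 0) indexed into a label tuple.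


-- ===== PORT A =====
def classify_mutect2_variant (filter_val : Option String) (info_dict : Option (List (String × String))) : String :=
  match filter_val with
  | none => "Somatic"
  | some fv =>
    if fv = "" ∨ fv = "." then "Somatic"
    else
      let filter_str := PySem.Str.strip fv
      if filter_str = "" ∨ filter_str = "." then "Somatic"
      else if filter_str = "PASS" then "Somatic"
      else
        let filters := (((PySem.Str.split? filter_str ";").getD []).filter
            (fun f => PySem.Str.strip f ≠ "")).map (fun f => PySem.Str.lower (PySem.Str.strip f))
        if filters = [] then "Somatic"
        else if filters.any (fun f => f = "germline" || f = "haplotype") then "Germline"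
        else if filters.any (fun f => f = "panel_of_normals" || f = "contamination" || f = "possible_numt") then "Reference"
        else "Artifact"

-- ===== PORT B =====
-- the constant token -> priority rank table (_RANK in Source B)
def pvRankTable : PySem.Dict String Nat :=
  PySem.Dict.ofList [("germline", 1), ("haplotype", 1), ("panel_of_normals", 2), ("contamination", 2), ("possible_numt", 2)]

-- the rank -> category tuple (_LABELS in Source B)
def pvLabels : List String := ["Somatic", "Germline", "Reference", "Artifact"]

def classify_mutect2_variant_alt (filter_val : Option String) (info_dict : Option (List (String × String))) : String :=
  match filter_val with
  | none => "Somatic"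
  | some fv =>
    let s := PySem.Str.strip fv
    if s = "" ∨ s = "." ∨ s = "PASS" then "Somatic"
    else
      -- min(generator, default=0): the generator filters empty tokens and looks up each rank
      let ranks := (((PySem.Str.split? s ";").getD []).filter
          (fun t => PySem.Str.strip t ≠ "")).map
          (fun t => PySem.Dict.getD pvRankTable (PySem.Str.lower (PySem.Str.strip t)) 3)
      let best : Nat := match ranks with
        | [] => 0
        | r :: rs => rs.foldl min r
      -- _LABELS[best]: best is always 0..3, so the index never raises
      (PySem.List.pyGet? pvLabels (best : Int)).getD ""

-- ===== PRECONDITION & SPEC =====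
def Spec_classify_mutect2_variant (filter_val : Option String) (info_dict : Option (List (String × String))) (out : String) : Prop := out = classify_mutect2_variant_alt filter_val info_dict
instance (filter_val : Option String) (info_dict : Option (List (String × String))) (out : String) : Decidable (Spec_classify_mutect2_variant filter_val info_dict out) := by unfold Spec_classify_mutect2_variant; infer_instance

-- ===== CLAIM (what is proved, stated in full; the proofs are below) =====
def Claim_equal_classify_mutect2_variant : Prop := ∀ (filter_val : Option String) (info_dict : Option (List (String × String))), Dom_classify_mutect2_variant filter_val info_dict → Spec_classify_mutect2_variant filter_val info_dict (classify_mutect2_variant filter_val info_dict)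

-- ===== LEMMAS AND PROOFS =====

-- the rank table agrees pointwise with A's two trigger sets
lemma rank_eq (f : String) :
    PySem.Dict.getD pvRankTable f 3 =
      if f = "germline" ∨ f = "haplotype" then 1
      else if f = "panel_of_normals" ∨ f = "contamination" ∨ f = "possible_numt" then 2
      else 3 := by
  by_cases e1 : f = "germline"
  · subst e1; decide
  by_cases e2 : f = "haplotype"
  · subst e2; decide
  by_cases e3 : f = "panel_of_normals"
  · subst e3; decide
  by_cases e4 : f = "contamination"
  · subst e4; decide
  by_cases e5 : f = "possible_numt"
  · subst e5; decide
  rw [if_neg (by tauto), if_neg (by tauto)]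
  have n1 : ("germline" == f) = false := beq_eq_false_iff_ne.mpr (fun h => e1 h.symm)
  have n2 : ("haplotype" == f) = false := beq_eq_false_iff_ne.mpr (fun h => e2 h.symm)
  have n3 : ("panel_of_normals" == f) = false := beq_eq_false_iff_ne.mpr (fun h => e3 h.symm)
  have n4 : ("contamination" == f) = false := beq_eq_false_iff_ne.mpr (fun h => e4 h.symm)
  have n5 : ("possible_numt" == f) = false := beq_eq_false_iff_ne.mpr (fun h => e5 h.symm)
  simp [pvRankTable, PySem.Dict.getD, PySem.Dict.get?, PySem.Dict.ofList, PySem.Dict.update,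
    PySem.Dict.empty, PySem.Dict.insert, PySem.Dict.contains, List.find?, n1, n2, n3, n4, n5]

-- the min-fold over the mapped ranks, characterised by A's two any-scans
lemma fold_min_rank (l : List String) (b : Nat) (hb : b ≤ 3) :
    (l.map (fun f => PySem.Dict.getD pvRankTable f 3)).foldl min b =
      if l.any (fun f => f = "germline" || f = "haplotype") then min b 1
      else if l.any (fun f => f = "panel_of_normals" || f = "contamination" || f = "possible_numt") then min b 2
      else b := by
  induction l generalizing b with
  | nil => simp
  | cons x xs ih =>
    simp only [List.map_cons, List.foldl_cons, List.any_cons]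
    rw [ih (min b (PySem.Dict.getD pvRankTable x 3)) (le_trans (min_le_left _ _) hb), rank_eq x]
    have e1 : (decide (x = "germline") || decide (x = "haplotype")) =
        decide (x = "germline" ∨ x = "haplotype") := by
      by_cases a : x = "germline" <;> by_cases b' : x = "haplotype" <;> simp [a, b']
    have e2 : (decide (x = "panel_of_normals") || decide (x = "contamination") || decide (x = "possible_numt")) =
        decide (x = "panel_of_normals" ∨ x = "contamination" ∨ x = "possible_numt") := by
      by_cases a : x = "panel_of_normals" <;> by_cases b' : x = "contamination" <;>
        by_cases c : x = "possible_numt" <;> simp [a, b', c]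
    simp only [e1, e2]
    by_cases h1 : x = "germline" ∨ x = "haplotype"
    · rw [if_pos h1]
      simp only [decide_eq_true h1, Bool.true_or]
      split_ifs <;> omega
    · rw [if_neg h1]
      simp only [decide_eq_false h1, Bool.false_or]
      by_cases h2 : x = "panel_of_normals" ∨ x = "contamination" ∨ x = "possible_numt"
      · rw [if_pos h2]
        simp only [decide_eq_true h2, Bool.true_or]
        split_ifs <;> omega
      · rw [if_neg h2]
        simp only [decide_eq_false h2, Bool.false_or]
        split_ifs <;> omega

-- A's any-scan chain equals B's min-rank + label lookup, for any token list
lemma tail_eq (l : List String) :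
    (if l = [] then "Somatic"
     else if l.any (fun f => f = "germline" || f = "haplotype") then "Germline"
     else if l.any (fun f => f = "panel_of_normals" || f = "contamination" || f = "possible_numt") then "Reference"
     else "Artifact")
  = (let ranks := l.map (fun f => PySem.Dict.getD pvRankTable f 3)
     let best : Nat := match ranks with
       | [] => 0
       | r :: rs => rs.foldl min r
     (PySem.List.pyGet? pvLabels (best : Int)).getD "") := by
  match l with
  | [] => decide
  | x :: xs =>
    simp only [List.map_cons]
    have hle : PySem.Dict.getD pvRankTable x 3 ≤ 3 := by
      rw [rank_eq]; split_ifs <;> omega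
    have : (xs.map (fun f => PySem.Dict.getD pvRankTable f 3)).foldl min
        (PySem.Dict.getD pvRankTable x 3) =
        ((x :: xs).map (fun f => PySem.Dict.getD pvRankTable f 3)).foldl min 3 := by
      simp [List.foldl_cons, min_eq_right hle]
    rw [if_neg (by simp), this, fold_min_rank _ 3 (le_refl 3)]
    cases hg : (x :: xs).any (fun f => f = "germline" || f = "haplotype") <;>
      cases hr : (x :: xs).any (fun f => f = "panel_of_normals" || f = "contamination" || f = "possible_numt") <;>
      simp <;> decide

-- ===== VERDICT (by name: the statement is the Claim_ definition above) =====
theorem classify_mutect2_variant_spec : Claim_equal_classify_mutect2_variant := by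
  intro filter_val info_dict _
  unfold Spec_classify_mutect2_variant classify_mutect2_variant classify_mutect2_variant_alt
  match filter_val with
  | none => rfl
  | some fv =>
    dsimp only
    by_cases h1 : fv = "" ∨ fv = "."
    · rcases h1 with h | h <;> subst h <;> decide
    rw [if_neg h1]
    generalize PySem.Str.strip fv = fs
    by_cases h2 : fs = "" ∨ fs = "."
    · rw [if_pos h2, if_pos (h2.elim Or.inl (fun h => Or.inr (Or.inl h)))]
    rw [if_neg h2]
    by_cases h3 : fs = "PASS"
    · rw [if_pos h3, if_pos (Or.inr (Or.inr h3))]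
    rw [if_neg h3, if_neg (by tauto : ¬(fs = "" ∨ fs = "." ∨ fs = "PASS"))]
    rw [tail_eq]
    simp only [List.map_map, Function.comp_def]
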